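-- pv_equiv track=rewrite | github.com/XyzHuy/-DL-Fine-tuning-coding-model | data/solution/Solution2941.py | maxGcdSum
-- ===== SOURCE A (Python) =====
-- from typing import List
-- from math import gcd
--
-- def maxGcdSum(nums: List[int], k: int) -> int:
--     n = len(nums)
--     max_gcd_sum = 0
--
--     # Iterate over all possible starting points of the subarray
--     for start in range(n - k + 1):
--         current_gcd = nums[start]
--         current_sum = nums[start]
--
--         # Expand the window to at least k elements
--         for end in range(start + 1, start + k):
--             current_gcd = gcd(current_gcd, nums[end])
--             current_sum += nums[end]
--
--         # Calculate the gcd-sum for the current window of size k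
--         max_gcd_sum = max(max_gcd_sum, current_gcd * current_sum)
--
--         # Continue expanding the window to the end of the array
--         for end in range(start + k, n):
--             current_gcd = gcd(current_gcd, nums[end])
--             current_sum += nums[end]
--             max_gcd_sum = max(max_gcd_sum, current_gcd * current_sum)
--
--     return max_gcd_sum
-- ===== SOURCE B (Python) =====
-- from math import gcd
--
-- def maxGcdSum(nums, k):
--     if k < 1:
--         raise ValueError("k must be a positive integer")
--     n = len(nums)
--     P = [0]
--     s = 0
--     for x in nums:
--         s += x
--         P.append(s)
--     minP = []
--     m = 0
--     for p in P[:-1]: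
--         m = min(m, p)
--         minP.append(m)
--     best = 0
--     for end in range(k - 1, n):
--         g = 0
--         start = end
--         while start >= 0:
--             x = nums[start]
--             g = x if start == end else gcd(g, x)
--             if start <= end - k + 1:
--                 best = max(best, g * (P[end + 1] - P[start]))
--             if g == 1:
--                 t = min(start - 1, end - k + 1)
--                 if t >= 0:
--                     best = max(best, P[end + 1] - minP[t])
--                 break
--             start -= 1
--     return best
-- ===== Notes on version B (the rewrite author's own statement) =====
-- stated objective: faster
-- what changed: B iterates per right endpoint scanning starts backwards (A iterates per start scanning endpoints forwards), replaces the running sum by precomputed prefix sums, and once the running gcd reaches 1 it answers all remaining (shorter-start) windows at once with a precomputed prefix-minimum of the prefix sums and breaks out of the inner scan.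
import Mathlib
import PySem

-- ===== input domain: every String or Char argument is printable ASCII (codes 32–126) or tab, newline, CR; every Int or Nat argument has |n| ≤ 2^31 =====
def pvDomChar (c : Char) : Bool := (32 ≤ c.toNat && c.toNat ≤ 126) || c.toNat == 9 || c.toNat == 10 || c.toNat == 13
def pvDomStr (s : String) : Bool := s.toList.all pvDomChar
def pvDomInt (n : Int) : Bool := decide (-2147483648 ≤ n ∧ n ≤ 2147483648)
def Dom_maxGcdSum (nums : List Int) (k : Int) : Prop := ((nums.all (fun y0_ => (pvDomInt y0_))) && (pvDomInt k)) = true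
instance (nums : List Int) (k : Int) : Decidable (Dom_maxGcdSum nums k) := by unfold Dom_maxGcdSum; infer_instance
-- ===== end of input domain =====

-- B replaces A's per-start forward scans by a per-endpoint backward scan over precomputed
-- prefix sums that stops as soon as the running gcd reaches 1, answering all remaining starts
-- at once via a prefix-minimum table (measurably faster on typical inputs; worst case unchanged).

-- ===== PORT A =====
-- math.gcd(a, b): always the nonnegative gcd
def pyGcd (a b : Int) : Int := (Int.gcd a b : Int)

def maxGcdSum (nums : List Int) (k : Int) : Int :=
  let n : Int := nums.length
  (PySem.List.pyRange 0 (n - k + 1) 1).foldl (fun maxGS start =>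
    -- current_gcd = nums[start]; current_sum = nums[start]  (indices in range under Pre_)
    let p := (PySem.List.pyRange (start + 1) (start + k) 1).foldl
      (fun (p : Int × Int) e => (pyGcd p.1 (PySem.List.pyGetD nums e 0), p.2 + PySem.List.pyGetD nums e 0))
      (PySem.List.pyGetD nums start 0, PySem.List.pyGetD nums start 0)
    let maxGS := max maxGS (p.1 * p.2)
    let q := (PySem.List.pyRange (start + k) n 1).foldl
      (fun (q : Int × Int × Int) e =>
        let g := pyGcd q.1 (PySem.List.pyGetD nums e 0)
        let s := q.2.1 + PySem.List.pyGetD nums e 0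
        (g, s, max q.2.2 (g * s))) (p.1, p.2, maxGS)
    q.2.2) 0

-- ===== PORT B =====
-- Source B raises ValueError for k < 1 (its input validation); that region is outside Pre_ below,
-- so the port does not model it.
-- the 'while start >= 0: … break …' loop of Source B
def bWhile (nums P minP : List Int) (k e : Int) (start g best : Int) : Int :=
  if h : 0 ≤ start then
    let x := PySem.List.pyGetD nums start 0
    let g' := if start = e then x else pyGcd g x
    let best' := if start ≤ e - k + 1 then
        max best (g' * (PySem.List.pyGetD P (e + 1) 0 - PySem.List.pyGetD P start 0))
      else best
    if g' = 1 then
      let t := min (start - 1) (e - k + 1)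
      if 0 ≤ t then max best' (PySem.List.pyGetD P (e + 1) 0 - PySem.List.pyGetD minP t 0) else best'
    else bWhile nums P minP k e (start - 1) g' best'
  else best
termination_by (start + 1).toNat
decreasing_by omega

def maxGcdSum_alt (nums : List Int) (k : Int) : Int :=
  let n : Int := nums.length
  let pp := nums.foldl (fun (q : List Int × Int) x => (q.1 ++ [q.2 + x], q.2 + x)) ([0], 0)
  let P := pp.1
  let mm := (PySem.List.slice P none (some (-1))).foldl
    (fun (q : List Int × Int) p => (q.1 ++ [min q.2 p], min q.2 p)) ([], 0)
  let minP := mm.1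
  (PySem.List.pyRange (k - 1) n 1).foldl (fun best e => bWhile nums P minP k e e 0 best) 0

-- ===== PRECONDITION & SPEC =====
-- Pre_ excludes exactly k ≤ 0, where A raises IndexError (start runs past the end of nums).
def Pre_maxGcdSum (nums : List Int) (k : Int) : Prop := 1 ≤ k
instance (nums : List Int) (k : Int) : Decidable (Pre_maxGcdSum nums k) := by unfold Pre_maxGcdSum; infer_instance
def pvWitness_maxGcdSum : List Int × Int := ([6, 4, 2], 2)

def Spec_maxGcdSum (nums : List Int) (k : Int) (out : Int) : Prop := out = maxGcdSum_alt nums k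
instance (nums : List Int) (k : Int) (out : Int) : Decidable (Spec_maxGcdSum nums k out) := by unfold Spec_maxGcdSum; infer_instance

-- ===== CLAIM (what is proved, stated in full; the proofs are below) =====
def Claim_equal_maxGcdSum : Prop := ∀ (nums : List Int) (k : Int), Dom_maxGcdSum nums k → Pre_maxGcdSum nums k → Spec_maxGcdSum nums k (maxGcdSum nums k)

-- ===== LEMMAS AND PROOFS =====

-- Abbreviations for the proofs: element access, A-style window gcd / window sum, candidate value,
-- prefix sums S and prefix minima M.
def getE (nums : List Int) (i : Int) : Int := PySem.List.pyGetD nums i 0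
def gA (nums : List Int) (s e : Int) : Int :=
  (PySem.List.pyRange (s + 1) (e + 1) 1).foldl (fun g i => pyGcd g (getE nums i)) (getE nums s)
def sW (nums : List Int) (s e : Int) : Int :=
  (PySem.List.pyRange (s + 1) (e + 1) 1).foldl (fun a i => a + getE nums i) (getE nums s)
def cand (nums : List Int) (s e : Int) : Int := gA nums s e * sW nums s e
def S (nums : List Int) (j : Int) : Int := (nums.take j.toNat).sum
def M (nums : List Int) (t : Int) : Int :=
  (PySem.List.pyRange 0 (t + 1) 1).foldl (fun m j => min m (S nums j)) 0
-- Nat-level gcd of the window of absolute values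
def NW (nums : List Int) (s e : Int) : Nat :=
  ((PySem.List.pyRange s (e + 1) 1).map (fun i => (getE nums i).natAbs)).foldr Nat.gcd 0

-- generic fold lemmas
theorem fold_init_le {α : Type} (f : Int → α → Int) (l : List α) (b : Int)
    (h : ∀ c x, x ∈ l → c ≤ f c x) : b ≤ l.foldl f b := by
  induction l generalizing b with
  | nil => simp
  | cons a t ih =>
    have h1 : b ≤ f b a := h b a (by simp)
    have h2 : f b a ≤ (t.foldl f (f b a)) := ih (f b a) (fun c x hx => h c x (by simp [hx]))
    calc b ≤ f b a := h1
      _ ≤ _ := h2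

theorem fold_hit {α : Type} (f : Int → α → Int) (l : List α) (b t : Int) (x : α)
    (hx : x ∈ l) (hmono : ∀ c y, y ∈ l → c ≤ f c y) (hhit : ∀ c, t ≤ f c x) :
    t ≤ l.foldl f b := by
  induction l generalizing b with
  | nil => simp at hx
  | cons a tl ih =>
    rcases List.mem_cons.mp hx with rfl | hx'
    · simp only [List.foldl_cons]
      calc t ≤ f b x := hhit b
        _ ≤ _ := fold_init_le f tl (f b x) (fun c y hy => hmono c y (by simp [hy]))
    · exact ih (f b a) hx' (fun c y hy => hmono c y (by simp [hy]))

theorem fold_preserve {α β : Type} (R : β → Prop) (f : β → α → β) (l : List α) (b : β)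
    (hb : R b) (h : ∀ c x, x ∈ l → R c → R (f c x)) : R (l.foldl f b) := by
  induction l generalizing b with
  | nil => simpa
  | cons a t ih =>
    exact ih (f b a) (h b a (by simp) hb) (fun c x hx hc => h c x (by simp [hx]) hc)

theorem foldl_max_comm (l : List Int) (b c : Int) :
    l.foldl max (max b c) = max (l.foldl max b) c := by
  induction l generalizing b with
  | nil => simp
  | cons a t ih =>
    simp only [List.foldl_cons]
    rw [show max (max b c) a = max (max b a) c by omega, ih]

-- Nat gcd fold facts
theorem foldr_gcd_init (l : List Nat) (x : Nat) :
    l.foldr Nat.gcd x = Nat.gcd (l.foldr Nat.gcd 0) x := by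
  induction l with
  | nil => simp
  | cons a t ih => simp only [List.foldr_cons, ih, Nat.gcd_assoc]

theorem pyGcd_cast (m : Nat) (b : Int) : pyGcd (m : Int) b = ((Nat.gcd m b.natAbs : Nat) : Int) := by
  simp [pyGcd, Int.gcd]

-- basic gA / sW / NW structure
theorem gA_self (nums : List Int) (s : Int) : gA nums s s = getE nums s := by
  simp [gA, PySem.List.pyRange_one_eq_nil (by omega : s + 1 ≤ s + 1)]

theorem sW_self (nums : List Int) (s : Int) : sW nums s s = getE nums s := by
  simp [sW, PySem.List.pyRange_one_eq_nil (by omega : s + 1 ≤ s + 1)]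

theorem gA_ext_right (nums : List Int) (s e : Int) (h : s ≤ e) :
    gA nums s (e + 1) = pyGcd (gA nums s e) (getE nums (e + 1)) := by
  unfold gA
  rw [PySem.List.pyRange_one_succ_right (by omega : s + 1 ≤ e + 1), List.foldl_append]
  simp

theorem sW_ext_right (nums : List Int) (s e : Int) (h : s ≤ e) :
    sW nums s (e + 1) = sW nums s e + getE nums (e + 1) := by
  unfold sW
  rw [PySem.List.pyRange_one_succ_right (by omega : s + 1 ≤ e + 1), List.foldl_append]
  simp

theorem NW_cons (nums : List Int) (s e : Int) (h : s ≤ e) :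
    NW nums s e = Nat.gcd (getE nums s).natAbs (NW nums (s + 1) e) := by
  unfold NW
  rw [PySem.List.pyRange_one_cons (by omega : s < e + 1)]
  simp

theorem NW_self (nums : List Int) (e : Int) : NW nums e e = (getE nums e).natAbs := by
  unfold NW
  rw [PySem.List.pyRange_one_cons (by omega : e < e + 1),
      PySem.List.pyRange_one_eq_nil (by omega : e + 1 ≤ e + 1)]
  simp

theorem NW_snoc (nums : List Int) (s e : Int) (h : s ≤ e) :
    NW nums s (e + 1) = Nat.gcd (NW nums s e) (getE nums (e + 1)).natAbs := by
  unfold NW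
  rw [PySem.List.pyRange_one_succ_right (by omega : s ≤ e + 1), List.map_append,
      List.foldr_append]
  simp only [List.map_cons, List.map_nil, List.foldr_cons, List.foldr_nil]
  rw [Nat.gcd_zero_right, foldr_gcd_init]

theorem gA_rep (nums : List Int) (s e : Int) (h : s < e) :
    gA nums s e = ((NW nums s e : Nat) : Int) := by
  have key : ∀ d : Nat, gA nums s (s + 1 + d) = ((NW nums s (s + 1 + d) : Nat) : Int) := by
    intro d
    induction d with
    | zero =>
      have h1 : gA nums s (s + 1) = pyGcd (gA nums s s) (getE nums (s + 1)) := by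
        have := gA_ext_right nums s s (le_refl s); simpa using this
      rw [show s + 1 + (0:Nat) = s + 1 by simp, h1, gA_self]
      rw [show NW nums s (s + 1) = Nat.gcd (NW nums s s) (getE nums (s+1)).natAbs from by
        have := NW_snoc nums s s (le_refl s); simpa using this]
      rw [NW_self]
      simp [pyGcd, Int.gcd]
    | succ d ih =>
      have hle : s ≤ s + 1 + (d : Int) := by omega
      have h1 : gA nums s (s + 1 + (d : Nat) + 1) = pyGcd (gA nums s (s + 1 + (d:Nat))) (getE nums (s + 1 + (d:Nat) + 1)) := by
        have := gA_ext_right nums s (s + 1 + (d : Nat)) (by push_cast; omega)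
        convert this using 3 <;> push_cast <;> ring
      have h2 : NW nums s (s + 1 + (d : Nat) + 1) = Nat.gcd (NW nums s (s + 1 + (d:Nat))) (getE nums (s + 1 + (d:Nat) + 1)).natAbs := by
        have := NW_snoc nums s (s + 1 + (d : Nat)) (by push_cast; omega)
        convert this using 3 <;> push_cast <;> ring
      rw [show ((d + 1 : Nat) : Int) = (d : Int) + 1 by push_cast; ring] at *
      rw [show s + 1 + ((d:Int) + 1) = s + 1 + (d:Int) + 1 by ring, h1, ih, h2, pyGcd_cast]
  have : e = s + 1 + ((e - s - 1).toNat : Int) := by omega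
  rw [this]; exact key _

theorem gA_ext_left (nums : List Int) (s e : Int) (h : s < e) :
    gA nums s e = pyGcd (gA nums (s + 1) e) (getE nums s) := by
  by_cases h2 : s + 1 = e
  · subst h2
    have h1 : gA nums s (s + 1) = pyGcd (gA nums s s) (getE nums (s + 1)) := by
      have := gA_ext_right nums s s (le_refl s); simpa using this
    rw [h1, gA_self, gA_self]
    simp [pyGcd, Int.gcd, Nat.gcd_comm]
  · have h3 : s + 1 < e := by omega
    rw [gA_rep nums s e h, gA_rep nums (s+1) e h3, NW_cons nums s e (by omega), pyGcd_cast]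
    simp [Nat.gcd_comm]

-- if the gcd of the window [u..e] is 1 then so is that of any wider window [s..e]
theorem nw_absorb (nums : List Int) (u e : Int) (hue : u ≤ e) (h1 : NW nums u e = 1) :
    ∀ s : Int, s ≤ u → NW nums s e = 1 := by
  intro s hs
  have key : ∀ d : Nat, ∀ s : Int, s + d = u → NW nums s e = 1 := by
    intro d
    induction d with
    | zero => intro s hs; rw [show s = u by omega]; exact h1
    | succ d ih =>
      intro s hs
      have := ih (s + 1) (by push_cast at hs ⊢; omega)
      rw [NW_cons nums s e (by push_cast at hs; omega), this]
      simp
  exact key (u - s).toNat s (by omega)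

theorem gA_one (nums : List Int) (s start e : Int) (hs : s < start) (hse : start ≤ e)
    (h : (start = e ∧ getE nums e = 1) ∨ (start < e ∧ gA nums start e = 1)) :
    gA nums s e = 1 := by
  have hnw : NW nums start e = 1 := by
    rcases h with ⟨rfl, hx⟩ | ⟨hlt, hg⟩
    · rw [NW_self, hx]; rfl
    · rw [gA_rep nums start e hlt] at hg
      exact_mod_cast hg
  have : NW nums s e = 1 := nw_absorb nums start e hse hnw s (by omega)
  rw [gA_rep nums s e (by omega), this]
  rfl

-- prefix sums
theorem S_zero (nums : List Int) : S nums 0 = 0 := by simp [S]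

theorem S_succ (nums : List Int) (j : Int) (h0 : 0 ≤ j) (hn : j < (nums.length : Int)) :
    S nums (j + 1) = S nums j + getE nums j := by
  have hj : j.toNat < nums.length := by omega
  have h1 : (j + 1).toNat = j.toNat + 1 := by omega
  unfold S getE
  rw [h1, List.take_add_one, List.getElem?_eq_getElem hj, List.sum_append,
      PySem.List.pyGetD_of_nonneg nums (0:Int) h0]
  simp [List.getD_eq_getElem?_getD, List.getElem?_eq_getElem hj]

theorem sW_S (nums : List Int) (s e : Int) (h0 : 0 ≤ s) (hse : s ≤ e) (hn : e < (nums.length : Int)) :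
    sW nums s e = S nums (e + 1) - S nums s := by
  have key : ∀ d : Nat, ∀ e : Int, s + d = e → e < (nums.length : Int) →
      sW nums s e = S nums (e + 1) - S nums s := by
    intro d
    induction d with
    | zero =>
      intro e he hn'
      rw [show e = s by omega, sW_self, S_succ nums s h0 (by omega)]
      ring
    | succ d ih =>
      intro e he hn'
      have he' : e = (s + d) + 1 := by push_cast at he; omega
      subst he'
      rw [sW_ext_right nums s (s + d) (by push_cast; omega),
          ih (s + d) (by push_cast; ring) (by omega),
          S_succ nums (s + (d:Int) + 1) (by omega) (by omega)]
      ring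
  exact key (e - s).toNat e (by omega) hn

-- characterization of the prefix-sum list built by B
theorem buildP_fold (l : List Int) : ∀ (acc : List Int) (s0 : Int),
    l.foldl (fun (q : List Int × Int) x => (q.1 ++ [q.2 + x], q.2 + x)) (acc, s0)
      = (acc ++ (List.range l.length).map (fun j => s0 + (l.take (j + 1)).sum), s0 + l.sum) := by
  induction l with
  | nil => intro acc s0; simp
  | cons x t ih =>
    intro acc s0
    simp only [List.foldl_cons, ih, List.length_cons, Prod.mk.injEq]
    refine ⟨?_, by simp [add_assoc]⟩
    rw [List.range_succ_eq_map, List.map_cons, List.map_map]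
    rw [List.append_assoc]
    congr 1
    simp only [List.singleton_append]
    congr 1
    · simp
    · apply List.map_congr_left
      intro j _
      simp [Function.comp, List.take_succ_cons, add_assoc]

theorem buildM_fold (l : List Int) : ∀ (acc : List Int) (m0 : Int),
    l.foldl (fun (q : List Int × Int) p => (q.1 ++ [min q.2 p], min q.2 p)) (acc, m0)
      = (acc ++ (List.range l.length).map (fun t => (l.take (t + 1)).foldl min m0),
         l.foldl min m0) := by
  induction l with
  | nil => intro acc m0; simp
  | cons x t ih =>
    intro acc m0
    simp only [List.foldl_cons, ih, List.length_cons, Prod.mk.injEq]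
    refine ⟨?_, by simp⟩
    rw [List.range_succ_eq_map, List.map_cons, List.map_map]
    rw [List.append_assoc]
    congr 1

-- the max-of-(A - S s) fold collapses to a prefix minimum
theorem L_dist (nums : List Int) (t : Int) (ht : 0 ≤ t) : ∀ (b A : Int),
    (PySem.List.pyRange 0 (t + 1) 1).foldl (fun m s => max m (A - S nums s)) b
      = max b (A - M nums t) := by
  have h01 : PySem.List.pyRange 0 1 1 = ([0] : List Int) := by decide
  have key : ∀ d : Nat, ∀ b A : Int,
      (PySem.List.pyRange 0 ((d : Int) + 1) 1).foldl (fun m s => max m (A - S nums s)) b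
        = max b (A - M nums (d : Int)) := by
    intro d
    induction d with
    | zero =>
      intro b A
      simp only [Nat.cast_zero, zero_add, M, h01, List.foldl_cons, List.foldl_nil, S_zero]
      omega
    | succ d ih =>
      intro b A
      rw [show ((d + 1 : Nat) : Int) = (d:Int) + 1 from by push_cast; ring]
      rw [PySem.List.pyRange_one_succ_right (by omega : (0:Int) ≤ (d:Int) + 1),
          List.foldl_append]
      simp only [List.foldl_cons, List.foldl_nil]
      rw [ih b A]
      have hM : M nums ((d:Int) + 1) = min (M nums (d:Int)) (S nums ((d:Int)+1)) := by
        unfold M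
        rw [PySem.List.pyRange_one_succ_right (by omega : (0:Int) ≤ (d:Int) + 1),
            List.foldl_append]
        simp
      rw [hM]
      omega
  intro b A
  have : t = ((t.toNat : Nat) : Int) := by omega
  rw [this]; exact key _ b A

-- ===== the two reductions to nested max-folds over cand =====

-- A, second inner loop
theorem A_inner2 (nums : List Int) (s : Int) (n : Int) :
    ∀ (d : Nat) (c : Int), n - c = d → s ≤ c - 1 → ∀ m : Int,
    ((PySem.List.pyRange c n 1).foldl
      (fun (q : Int × Int × Int) e =>
        let g := pyGcd q.1 (PySem.List.pyGetD nums e 0)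
        let s' := q.2.1 + PySem.List.pyGetD nums e 0
        (g, s', max q.2.2 (g * s'))) (gA nums s (c - 1), sW nums s (c - 1), m)).2.2
    = (PySem.List.pyRange c n 1).foldl (fun m e => max m (cand nums s e)) m := by
  intro d
  induction d with
  | zero =>
    intro c hc hs m
    rw [PySem.List.pyRange_one_eq_nil (by omega : n ≤ c)]
    simp
  | succ d ih =>
    intro c hc hs m
    rw [PySem.List.pyRange_one_cons (by omega : c < n)]
    simp only [List.foldl_cons]
    have hg : pyGcd (gA nums s (c - 1)) (PySem.List.pyGetD nums c 0) = gA nums s c := by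
      have := gA_ext_right nums s (c - 1) (by omega)
      rw [show c - 1 + 1 = c by ring] at this
      rw [this]; rfl
    have hsum : sW nums s (c - 1) + PySem.List.pyGetD nums c 0 = sW nums s c := by
      have := sW_ext_right nums s (c - 1) (by omega)
      rw [show c - 1 + 1 = c by ring] at this
      rw [this]; rfl
    have := ih (c + 1) (by omega) (by omega) (max m (gA nums s c * sW nums s c))
    rw [show c + 1 - 1 = c by ring] at this
    simp only [hg, hsum]
    rw [this]
    rfl

-- A equals the nested max-fold of candidates
theorem A_eq (nums : List Int) (k : Int) (hk : 1 ≤ k) :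
    maxGcdSum nums k
      = (PySem.List.pyRange 0 ((nums.length : Int) - k + 1) 1).foldl
          (fun m s => (PySem.List.pyRange (s + k - 1) (nums.length : Int) 1).foldl
            (fun m e => max m (cand nums s e)) m) 0 := by
  unfold maxGcdSum
  apply PySem.List.foldl_congr_mem
  intro m s hs
  have hmem := PySem.List.mem_pyRange_one.mp hs
  simp only
  rw [PySem.List.foldl_prod_mk (fun g i => pyGcd g (PySem.List.pyGetD nums i 0))
        (fun a i => a + PySem.List.pyGetD nums i 0) (PySem.List.pyRange (s + 1) (s + k) 1)
        (PySem.List.pyGetD nums s 0) (PySem.List.pyGetD nums s 0)]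
  have hp1 : (PySem.List.pyRange (s + 1) (s + k) 1).foldl (fun g i => pyGcd g (PySem.List.pyGetD nums i 0)) (PySem.List.pyGetD nums s 0) = gA nums s (s + k - 1) := by
    unfold gA getE
    rw [show s + k - 1 + 1 = s + k by ring]
  have hp2 : (PySem.List.pyRange (s + 1) (s + k) 1).foldl (fun a i => a + PySem.List.pyGetD nums i 0) (PySem.List.pyGetD nums s 0) = sW nums s (s + k - 1) := by
    unfold sW getE
    rw [show s + k - 1 + 1 = s + k by ring]
  dsimp only
  rw [hp1, hp2]
  have hsk : s + k - 1 < (nums.length : Int) := by omega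
  rw [PySem.List.pyRange_one_cons hsk]
  simp only [List.foldl_cons]
  rw [show s + k - 1 + 1 = s + k by ring]
  have hinner := A_inner2 nums s (nums.length : Int) ((nums.length : Int) - (s + k)).toNat (s + k)
    (by omega) (by omega) (max m (cand nums s (s + k - 1)))
  rw [show s + k - 1 = s + k - 1 from rfl] at hinner
  have hcand : gA nums s (s + k - 1) * sW nums s (s + k - 1) = cand nums s (s + k - 1) := rfl
  rw [hcand]
  exact hinner

-- B: the while loop computes a max over candidates with starts in [0, min start (e-k+1)]
theorem bWhile_eq (nums P minP : List Int) (k e : Int)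
    (hk : 1 ≤ k) (he0 : k - 1 ≤ e) (hen : e < (nums.length : Int))
    (hP : ∀ j : Int, 0 ≤ j → j ≤ (nums.length : Int) → PySem.List.pyGetD P j 0 = S nums j)
    (hM : ∀ t : Int, 0 ≤ t → t < (nums.length : Int) → PySem.List.pyGetD minP t 0 = M nums t) :
    ∀ (d : Nat) (start : Int), start + 1 = d → -1 ≤ start → start ≤ e →
    ∀ (g best : Int), (0 ≤ start → start < e → g = gA nums (start + 1) e) →
    bWhile nums P minP k e start g best
      = ((PySem.List.pyRange 0 (min start (e - k + 1) + 1) 1).map (fun s => cand nums s e)).foldl max best := by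
  intro d
  induction d with
  | zero =>
    intro start hd h1 h2 g best hinv
    have : start = -1 := by omega
    subst this
    rw [bWhile]
    simp only [show ¬ (0:Int) ≤ -1 by omega, dif_neg, not_false_iff]
    rw [PySem.List.pyRange_one_eq_nil (by omega : min (-1) (e - k + 1) + 1 ≤ 0)]
    simp
  | succ d ih =>
    intro start hd h1 h2 g best hinv
    have hstart : 0 ≤ start := by omega
    rw [bWhile]
    rw [dif_pos hstart]
    simp only
    set x := PySem.List.pyGetD nums start 0 with hx
    have hg' : (if start = e then x else pyGcd g x) = gA nums start e := by
      by_cases hse : start = e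
      · subst hse; simp [gA_self, getE, hx]
      · rw [if_neg hse, hinv hstart (by omega)]
        exact (gA_ext_left nums start e (by omega)).symm
    rw [hg']
    have hPe : PySem.List.pyGetD P (e + 1) 0 = S nums (e + 1) := hP (e+1) (by omega) (by omega)
    have hsub : ∀ s : Int, 0 ≤ s → s ≤ e →
        PySem.List.pyGetD P (e + 1) 0 - PySem.List.pyGetD P s 0 = sW nums s e := by
      intro s hs0 hse
      rw [hPe, hP s hs0 (by omega), sW_S nums s e hs0 hse hen]
    -- the list below the current start, as a max-fold
    by_cases hbreak : gA nums start e = 1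
    · rw [if_pos hbreak]
      have habs : ∀ s : Int, 0 ≤ s → s < start → cand nums s e = S nums (e+1) - S nums s := by
        intro s hs0 hss
        have hone : gA nums s e = 1 := by
          apply gA_one nums s start e hss h2
          by_cases hse : start = e
          · left; refine ⟨hse, ?_⟩
            subst hse
            rw [gA_self] at hbreak; exact hbreak
          · right; exact ⟨by omega, hbreak⟩
        unfold cand
        rw [hone, sW_S nums s e hs0 (by omega) hen]
        ring
      by_cases hv : start ≤ e - k + 1
      · -- current candidate valid; remaining = [0..start-1]
        rw [if_pos hv, hsub start hstart h2]
        have hmin1 : min start (e - k + 1) = start := by omega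
        have hmin2 : min (start - 1) (e - k + 1) = start - 1 := by omega
        rw [hmin1, hmin2]
        rw [PySem.List.pyRange_one_succ_right (by omega : (0:Int) ≤ start), List.map_append,
            List.foldl_append]
        simp only [List.map_cons, List.map_nil, List.foldl_cons, List.foldl_nil]
        have hcme : gA nums start e * sW nums start e = cand nums start e := rfl
        rw [hcme]
        by_cases hs1 : 0 ≤ start - 1
        · rw [if_pos hs1]
          have hlist : ((PySem.List.pyRange 0 start 1).map (fun s => cand nums s e)).foldl max best
              = (PySem.List.pyRange 0 start 1).foldl (fun m s => max m (S nums (e+1) - S nums s)) best := by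
            rw [List.foldl_map]
            apply PySem.List.foldl_congr_mem
            intro acc s hsmem
            have := PySem.List.mem_pyRange_one.mp hsmem
            rw [habs s (by omega) (by omega)]
          have hL := L_dist nums (start - 1) hs1 best (S nums (e+1))
          rw [show start - 1 + 1 = start from by ring] at hL
          rw [hlist, hL, hM (start - 1) hs1 (by omega), hPe]
          omega
        · rw [if_neg hs1]
          rw [PySem.List.pyRange_one_eq_nil (by omega : start ≤ 0)]
          simp
      · -- current candidate invalid; remaining = [0..e-k+1]
        rw [if_neg hv]
        have hmin1 : min start (e - k + 1) = e - k + 1 := by omega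
        have hmin2 : min (start - 1) (e - k + 1) = e - k + 1 := by omega
        rw [hmin1, hmin2, if_pos (by omega : (0:Int) ≤ e - k + 1)]
        have hlist : ((PySem.List.pyRange 0 (e - k + 1 + 1) 1).map (fun s => cand nums s e)).foldl max best
            = (PySem.List.pyRange 0 (e - k + 1 + 1) 1).foldl (fun m s => max m (S nums (e+1) - S nums s)) best := by
          rw [List.foldl_map]
          apply PySem.List.foldl_congr_mem
          intro acc s hsmem
          have := PySem.List.mem_pyRange_one.mp hsmem
          rw [habs s (by omega) (by omega)]
        rw [hlist, L_dist nums (e - k + 1) (by omega) best (S nums (e+1)),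
            hM (e - k + 1) (by omega) (by omega), hPe]
    · rw [if_neg hbreak]
      have hrec := ih (start - 1) (by omega) (by omega) (by omega)
        (gA nums start e)
        (if start ≤ e - k + 1 then max best (gA nums start e * (PySem.List.pyGetD P (e + 1) 0 - PySem.List.pyGetD P start 0)) else best)
        (by intro h1' h2'; rw [show start - 1 + 1 = start by ring])
      rw [hrec]
      by_cases hv : start ≤ e - k + 1
      · rw [if_pos hv]
        have hmin1 : min start (e - k + 1) = start := by omega
        have hmin2 : min (start - 1) (e - k + 1) = start - 1 := by omega
        rw [hmin1, hmin2, hsub start hstart h2]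
        rw [PySem.List.pyRange_one_succ_right (by omega : (0:Int) ≤ start), List.map_append,
            List.foldl_append]
        simp only [List.map_cons, List.map_nil, List.foldl_cons, List.foldl_nil]
        have hc : gA nums start e * sW nums start e = cand nums start e := rfl
        rw [hc, show start - 1 + 1 = start from by ring, foldl_max_comm]
      · rw [if_neg hv]
        have hmin1 : min start (e - k + 1) = e - k + 1 := by omega
        have hmin2 : min (start - 1) (e - k + 1) = e - k + 1 := by omega
        rw [hmin1, hmin2]

-- B equals the nested max-fold of candidates
theorem B_eq (nums : List Int) (k : Int) (hk : 1 ≤ k) :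
    maxGcdSum_alt nums k
      = (PySem.List.pyRange (k - 1) (nums.length : Int) 1).foldl
          (fun best e => ((PySem.List.pyRange 0 (e - k + 1 + 1) 1).map (fun s => cand nums s e)).foldl max best) 0 := by
  unfold maxGcdSum_alt
  simp only
  set P := (nums.foldl (fun (q : List Int × Int) x => (q.1 ++ [q.2 + x], q.2 + x)) ([0], 0)).1 with hPdef
  have hP_eq : P = (List.range (nums.length + 1)).map (fun j => (nums.take j).sum) := by
    rw [hPdef, buildP_fold]
    rw [List.range_succ_eq_map, List.map_cons, List.map_map]
    simp [Function.comp]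
  have hPd : P.dropLast = (List.range nums.length).map (fun j => (nums.take j).sum) := by
    rw [hP_eq, List.range_succ, List.map_append]
    exact List.dropLast_concat
  set minP := ((PySem.List.slice P none (some (-1))).foldl
      (fun (q : List Int × Int) p => (q.1 ++ [min q.2 p], min q.2 p)) ([], 0)).1 with hMdef
  have hM_eq : minP = (List.range nums.length).map (fun t => ((P.dropLast.take (t + 1)).foldl min 0)) := by
    rw [hMdef, PySem.List.slice_to_neg_one, buildM_fold]
    have hlen : P.dropLast.length = nums.length := by
      rw [hPd]; simp
    rw [hlen]
    simp
  have hPget : ∀ j : Int, 0 ≤ j → j ≤ (nums.length : Int) → PySem.List.pyGetD P j 0 = S nums j := by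
    intro j h0 hn
    rw [PySem.List.pyGetD_of_nonneg _ _ h0, hP_eq,
        PySem.List.getD_map_range _ (nums.length + 1) j.toNat 0 (by omega)]
    rfl
  have hMget : ∀ t : Int, 0 ≤ t → t < (nums.length : Int) → PySem.List.pyGetD minP t 0 = M nums t := by
    intro t h0 hn
    rw [PySem.List.pyGetD_of_nonneg _ _ h0, hM_eq,
        PySem.List.getD_map_range _ nums.length t.toNat 0 (by omega)]
    rw [hPd, ← List.map_take, List.take_range, show min (t.toNat + 1) nums.length = t.toNat + 1 from by omega]
    unfold M
    rw [List.foldl_map, PySem.List.pyRange_one 0 (t + 1), List.foldl_map,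
        show ((t + 1) - 0).toNat = t.toNat + 1 from by omega]
    apply PySem.List.foldl_congr_mem
    intro acc x hx
    simp [S]
  apply PySem.List.foldl_congr_mem
  intro best e he
  have hmem := PySem.List.mem_pyRange_one.mp he
  have hw := bWhile_eq nums P minP k e hk (by omega) (by omega) hPget hMget
    (e + 1).toNat e (by omega) (by omega) (le_refl e) 0 best
    (fun _ h2 => absurd h2 (lt_irrefl e))
  rw [hw, show min e (e - k + 1) = e - k + 1 from by omega]

-- the index set of candidates both ports scan
def Okay (nums : List Int) (k : Int) (s e : Int) : Prop :=
  0 ≤ s ∧ s + k ≤ e + 1 ∧ e < (nums.length : Int)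

theorem final_eq (nums : List Int) (k : Int) (hk : 1 ≤ k) :
    maxGcdSum nums k = maxGcdSum_alt nums k := by
  rw [A_eq nums k hk, B_eq nums k hk]
  have hAmono : ∀ (c s : Int),
      c ≤ (PySem.List.pyRange (s + k - 1) (nums.length : Int) 1).foldl (fun m e => max m (cand nums s e)) c :=
    fun c s => (PySem.List.le_foldl_max_int _ _ _).1
  have hBmono : ∀ (c e : Int),
      c ≤ ((PySem.List.pyRange 0 (e - k + 1 + 1) 1).map (fun s => cand nums s e)).foldl max c :=
    fun c e => (PySem.List.le_foldl_max _ _).1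
  -- each side dominates every candidate of the common index set, and is 0 or a candidate
  have hP2A : ∀ s e : Int, Okay nums k s e →
      cand nums s e ≤ (PySem.List.pyRange 0 ((nums.length : Int) - k + 1) 1).foldl
        (fun m s => (PySem.List.pyRange (s + k - 1) (nums.length : Int) 1).foldl
          (fun m e => max m (cand nums s e)) m) 0 := by
    intro s e ⟨h1, h2, h3⟩
    apply fold_hit _ _ 0 (cand nums s e) s
      (PySem.List.mem_pyRange_one.mpr ⟨h1, by omega⟩)
      (fun c y _ => hAmono c y)
    intro c
    exact (PySem.List.le_foldl_max_int _ _ c).2 e (PySem.List.mem_pyRange_one.mpr ⟨by omega, h3⟩)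
  have hP2B : ∀ s e : Int, Okay nums k s e →
      cand nums s e ≤ (PySem.List.pyRange (k - 1) (nums.length : Int) 1).foldl
        (fun best e => ((PySem.List.pyRange 0 (e - k + 1 + 1) 1).map (fun s => cand nums s e)).foldl max best) 0 := by
    intro s e ⟨h1, h2, h3⟩
    apply fold_hit _ _ 0 (cand nums s e) e
      (PySem.List.mem_pyRange_one.mpr ⟨by omega, h3⟩)
      (fun c y _ => hBmono c y)
    intro c
    exact (PySem.List.le_foldl_max _ c).2 (cand nums s e)
      (List.mem_map.mpr ⟨s, PySem.List.mem_pyRange_one.mpr ⟨h1, by omega⟩, rfl⟩)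
  have hP3A : (PySem.List.pyRange 0 ((nums.length : Int) - k + 1) 1).foldl
        (fun m s => (PySem.List.pyRange (s + k - 1) (nums.length : Int) 1).foldl
          (fun m e => max m (cand nums s e)) m) 0 = 0
      ∨ ∃ s e : Int, Okay nums k s e ∧ (PySem.List.pyRange 0 ((nums.length : Int) - k + 1) 1).foldl
        (fun m s => (PySem.List.pyRange (s + k - 1) (nums.length : Int) 1).foldl
          (fun m e => max m (cand nums s e)) m) 0 = cand nums s e := by
    apply fold_preserve (fun a => a = 0 ∨ ∃ s e : Int, Okay nums k s e ∧ a = cand nums s e)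
    · exact Or.inl rfl
    · intro c s hs hc
      have hsmem := PySem.List.mem_pyRange_one.mp hs
      apply fold_preserve (fun a => a = 0 ∨ ∃ s e : Int, Okay nums k s e ∧ a = cand nums s e) _ _ _ hc
      intro c' e he hc'
      have hemem := PySem.List.mem_pyRange_one.mp he
      rcases max_choice c' (cand nums s e) with h | h
      · rw [h]; exact hc'
      · rw [h]; exact Or.inr ⟨s, e, ⟨hsmem.1, by omega, hemem.2⟩, rfl⟩
  have hP3B : (PySem.List.pyRange (k - 1) (nums.length : Int) 1).foldl
        (fun best e => ((PySem.List.pyRange 0 (e - k + 1 + 1) 1).map (fun s => cand nums s e)).foldl max best) 0 = 0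
      ∨ ∃ s e : Int, Okay nums k s e ∧ (PySem.List.pyRange (k - 1) (nums.length : Int) 1).foldl
        (fun best e => ((PySem.List.pyRange 0 (e - k + 1 + 1) 1).map (fun s => cand nums s e)).foldl max best) 0 = cand nums s e := by
    apply fold_preserve (fun a => a = 0 ∨ ∃ s e : Int, Okay nums k s e ∧ a = cand nums s e)
    · exact Or.inl rfl
    · intro c e he hc
      have hemem := PySem.List.mem_pyRange_one.mp he
      rcases PySem.List.foldl_max_mem ((PySem.List.pyRange 0 (e - k + 1 + 1) 1).map (fun s => cand nums s e)) c with h | h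
      · rw [h]; exact hc
      · rcases List.mem_map.mp h with ⟨s, hsmem, hval⟩
        have hs := PySem.List.mem_pyRange_one.mp hsmem
        rw [← hval]
        exact Or.inr ⟨s, e, ⟨hs.1, by omega, hemem.2⟩, rfl⟩
  have hP1A : (0:Int) ≤ (PySem.List.pyRange 0 ((nums.length : Int) - k + 1) 1).foldl
      (fun m s => (PySem.List.pyRange (s + k - 1) (nums.length : Int) 1).foldl
        (fun m e => max m (cand nums s e)) m) 0 :=
    fold_init_le _ _ 0 (fun c y _ => hAmono c y)
  have hP1B : (0:Int) ≤ (PySem.List.pyRange (k - 1) (nums.length : Int) 1).foldl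
      (fun best e => ((PySem.List.pyRange 0 (e - k + 1 + 1) 1).map (fun s => cand nums s e)).foldl max best) 0 :=
    fold_init_le _ _ 0 (fun c y _ => hBmono c y)
  apply le_antisymm
  · rcases hP3A with h | ⟨s, e, hok, h⟩
    · rw [h]; exact hP1B
    · rw [h]; exact hP2B s e hok
  · rcases hP3B with h | ⟨s, e, hok, h⟩
    · rw [h]; exact hP1A
    · rw [h]; exact hP2A s e hok

-- ===== VERDICT (by name: the statement is the Claim_ definition above) =====
theorem maxGcdSum_spec : Claim_equal_maxGcdSum := by
  intro nums k _ hPre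
  unfold Spec_maxGcdSum
  exact final_eq nums k hPre
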